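-- pv_equiv track=rewrite | github.com/abadithela/NFM2021_Static_Test_Synthesis | src/restrict_transitions_cycles.py | update_Q0_edges
-- ===== SOURCE A (Python) =====
-- def  update_Q0_edges(Pcut, newC):
--     newC_adj = []
--     # Checking if edges in newC have "q0_aug_nodes" as the end vertex in an edge
--     for e in newC:
--         if e[1]=="q0_aug_nodes":
--             for paths in Pcut:
--                 for p in paths:
--                     if e[0] in p:   # If the first node is in the path p
--                         e0_idx = p.index(e[0])
--                         e0_pred = p[e0_idx-1]
--                         candidate_edge = (e0_pred, e[0])
--                         if candidate_edge not in newC_adj: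
--                             newC_adj.append(candidate_edge)
--         else:
--             newC_adj.append(e)
--     return newC_adj
-- ===== SOURCE B (Python) =====
-- def update_Q0_edges(Pcut, newC):
--     # nodes that start an edge ending in "q0_aug_nodes"
--     q0_nodes = {e[0] for e in newC if e[1] == "q0_aug_nodes"}
--     # One pass over Pcut: map each such node -> list of (predecessor, node)
--     # candidate edges, one per path containing the node (first occurrence,
--     # wrap-around predecessor).
--     preds = {}
--     if q0_nodes:
--         for paths in Pcut:
--             for p in paths:
--                 seen_nodes = set()
--                 for i, node in enumerate(p):
--                     if node in q0_nodes and node not in seen_nodes: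
--                         seen_nodes.add(node)
--                         preds.setdefault(node, []).append((p[i - 1], node))
--     # One pass over newC with a set mirroring the output for O(1) dedup.
--     out = []
--     seen = set()
--     for e in newC:
--         if e[1] == "q0_aug_nodes":
--             for cand in preds.get(e[0], []):
--                 if cand not in seen:
--                     seen.add(cand)
--                     out.append(cand)
--         else:
--             out.append(e)
--             seen.add(e)
--     return out
-- ===== Notes on version B (the rewrite author's own statement) =====
-- stated objective: alternative
-- what changed: Instead of rescanning every path of Pcut for every q0-ending edge (with a linear membership test on the growing output for dedup), B precomputes in one pass over Pcut a dict mapping each q0-source node to its list of (predecessor, node) candidate edges (a per-path set keeps first occurrences only), then makes one pass over newC using that dict plus a set mirroring the output for dedup.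
import Mathlib
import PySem

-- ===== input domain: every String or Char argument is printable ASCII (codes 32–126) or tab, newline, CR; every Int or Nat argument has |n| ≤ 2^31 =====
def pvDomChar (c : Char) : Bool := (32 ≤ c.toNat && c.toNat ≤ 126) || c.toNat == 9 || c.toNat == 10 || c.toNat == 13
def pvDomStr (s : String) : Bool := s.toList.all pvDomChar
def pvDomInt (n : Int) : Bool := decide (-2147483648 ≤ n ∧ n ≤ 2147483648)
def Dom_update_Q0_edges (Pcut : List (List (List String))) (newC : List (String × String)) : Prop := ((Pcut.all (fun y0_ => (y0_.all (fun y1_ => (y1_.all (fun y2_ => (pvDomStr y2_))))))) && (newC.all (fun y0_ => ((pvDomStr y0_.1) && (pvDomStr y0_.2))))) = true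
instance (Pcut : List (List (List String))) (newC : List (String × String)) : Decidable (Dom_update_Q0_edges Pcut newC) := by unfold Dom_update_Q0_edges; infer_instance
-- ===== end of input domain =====

-- B replaces A's per-edge rescan of all paths with a precomputed node → candidate-edge
-- dict and a set mirroring the output for dedup.


-- ===== PORT A =====
-- literal transliteration of A: for each edge, rescan all paths of Pcut; dedup by a
-- membership test on the growing output list. p[e0_idx-1] is ported with
-- PySem.List.pyGetD (its default is never used: e0_idx indexes a member of p, so p
-- is nonempty and both e0_idx and the wrapped -1 are in range).
def update_Q0_edges (Pcut : List (List (List String))) (newC : List (String × String)) : List (String × String) :=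
  newC.foldl (fun newC_adj e =>
    if e.2 == "q0_aug_nodes" then
      Pcut.foldl (fun newC_adj paths =>
        paths.foldl (fun newC_adj p =>
          if p.contains e.1 then
            match PySem.List.index? p e.1 with
            | some e0_idx =>
              if newC_adj.contains (PySem.List.pyGetD p ((e0_idx : Int) - 1) "", e.1) then newC_adj
              else newC_adj ++ [(PySem.List.pyGetD p ((e0_idx : Int) - 1) "", e.1)]
            | none => newC_adj  -- unreachable: e.1 ∈ p
          else newC_adj) newC_adj) newC_adj
    else newC_adj ++ [e]) []

-- ===== PORT B =====
-- the set comprehension {e[0] for e in newC if e[1] == "q0_aug_nodes"}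
-- (only membership-tested afterwards, so PySem.Set is order-safe)
def pvQ0Nodes (newC : List (String × String)) : PySem.Set String :=
  PySem.Set.ofList (newC.filterMap (fun e =>
    if e.2 == "q0_aug_nodes" then some e.1 else none))

-- B phase 1: one pass over Pcut building preds : node → its candidate edges,
-- restricted to the q0 source nodes (per path, a local set keeps only the first
-- occurrence of each node; p[i-1] ported with pyGetD as above, default unreachable).
def pvBuildPreds (Pcut : List (List (List String))) (q0 : PySem.Set String) : PySem.Dict String (List (String × String)) :=
  Pcut.foldl (fun preds paths =>
    paths.foldl (fun preds p =>
      ((PySem.List.enumerate p 0).foldl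
        (fun (st : PySem.Set String × PySem.Dict String (List (String × String))) pr =>
          if PySem.Set.contains q0 pr.2 && !(PySem.Set.contains st.1 pr.2) then
            (PySem.Set.add st.1 pr.2,
             st.2.modify pr.2 [] (· ++ [(PySem.List.pyGetD p (pr.1 - 1) "", pr.2)]))
          else st)
        (PySem.Set.empty, preds)).2) preds) PySem.Dict.empty

-- B phase 2: one pass over newC; `seen` is a set mirroring the output for dedup.
def update_Q0_edges_alt (Pcut : List (List (List String))) (newC : List (String × String)) : List (String × String) :=
  let q0 := pvQ0Nodes newC
  let preds := if q0.isEmpty then PySem.Dict.empty else pvBuildPreds Pcut q0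
  (newC.foldl (fun (st : List (String × String) × PySem.Set (String × String)) e =>
    if e.2 == "q0_aug_nodes" then
      (preds.getD e.1 []).foldl (fun st cand =>
        if PySem.Set.contains st.2 cand then st
        else (st.1 ++ [cand], PySem.Set.add st.2 cand)) st
    else (st.1 ++ [e], PySem.Set.add st.2 e)) ([], PySem.Set.empty)).1

-- ===== PRECONDITION & SPEC =====
def Spec_update_Q0_edges (Pcut : List (List (List String))) (newC : List (String × String)) (out : List (String × String)) : Prop := out = update_Q0_edges_alt Pcut newC
instance (Pcut : List (List (List String))) (newC : List (String × String)) (out : List (String × String)) : Decidable (Spec_update_Q0_edges Pcut newC out) := by unfold Spec_update_Q0_edges; infer_instance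

-- ===== CLAIM (what is proved, stated in full; the proofs are below) =====
def Claim_equal_update_Q0_edges : Prop := ∀ (Pcut : List (List (List String))) (newC : List (String × String)), Dom_update_Q0_edges Pcut newC → Spec_update_Q0_edges Pcut newC (update_Q0_edges Pcut newC)

-- ===== LEMMAS AND PROOFS =====

-- the candidate edge one path contributes for node x (none if x ∉ p)
def pvCandOf (p : List String) (x : String) : Option (String × String) :=
  (PySem.List.index? p x).map (fun i => (PySem.List.pyGetD p ((i : Int) - 1) "", x))

-- all candidate edges for x, in Pcut order
def pvCands (Pcut : List (List (List String))) (x : String) : List (String × String) :=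
  Pcut.flatten.filterMap (fun p => pvCandOf p x)

-- append-if-new step shared by both sides
def pvIns (acc : List (String × String)) (c : String × String) : List (String × String) :=
  if acc.contains c then acc else acc ++ [c]

-- A's per-edge nested scan = fold of pvIns over pvCands
theorem pvA_inner (Pcut : List (List (List String))) (x : String)
    (acc : List (String × String)) :
    Pcut.foldl (fun a paths =>
      paths.foldl (fun a p =>
        if p.contains x then
          match PySem.List.index? p x with
          | some i =>
            if a.contains (PySem.List.pyGetD p ((i : Int) - 1) "", x) then a
            else a ++ [(PySem.List.pyGetD p ((i : Int) - 1) "", x)]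
          | none => a
        else a) a) acc
    = (pvCands Pcut x).foldl pvIns acc := by
  rw [pvCands, ← List.foldl_flatten]
  induction Pcut.flatten generalizing acc with
  | nil => rfl
  | cons p t ih =>
    simp only [List.foldl_cons, List.filterMap_cons]
    by_cases hx : x ∈ p
    · have hc : p.contains x = true := by simpa using hx
      obtain ⟨i, hi⟩ := Option.isSome_iff_exists.mp
        ((PySem.List.index?_isSome_iff p x).mpr hx)
      rw [if_pos hc, hi]
      simp only [pvCandOf, hi]
      rw [ih]
      rfl
    · have hc : p.contains x = false := by simpa using hx
      have hn : PySem.List.index? p x = none := (PySem.List.index?_eq_none_iff p x).mpr hx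
      rw [if_neg (by simpa using hx)]
      simp only [pvCandOf, hn]
      exact ih acc

-- find? over enumerate locates the first index
theorem pvFind_enumerate (p : List String) (x : String) (s : Int) :
    (PySem.List.enumerate p s).find? (fun pr => pr.2 == x)
      = (PySem.List.index? p x).map (fun k => (s + (k : Int), x)) := by
  induction p generalizing s with
  | nil => simp [PySem.List.enumerate_nil, PySem.List.index?_eq_idxOf?, List.idxOf?]
  | cons a t ih =>
    rw [PySem.List.enumerate_cons]
    by_cases h : a = x
    · subst h
      rw [PySem.List.index?_cons_self]
      simp [List.find?]
    · rw [PySem.List.index?_cons_of_ne t h]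
      simp only [List.find?]
      have hb : ((s, a).2 == x) = false := by simpa using h
      rw [hb, ih (s + 1)]
      cases hk : PySem.List.index? t x with
      | none => simp
      | some k =>
        simp only [Option.map_some]
        have he : (s + 1) + (k : Int) = s + ((k : Int) + 1) := by ring
        simp [he]

-- one path's enumerate fold appends its candidate to x's dict entry (x a q0 node)
theorem pvPath_step (p : List String) (x : String) (q0 : PySem.Set String)
    (hx : x ∈ q0)
    (l : List (Int × String)) (S : PySem.Set String)
    (d : PySem.Dict String (List (String × String))) :
    ((l.foldl
        (fun (st : PySem.Set String × PySem.Dict String (List (String × String))) pr =>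
          if PySem.Set.contains q0 pr.2 && !(PySem.Set.contains st.1 pr.2) then
            (PySem.Set.add st.1 pr.2,
             st.2.modify pr.2 [] (· ++ [(PySem.List.pyGetD p (pr.1 - 1) "", pr.2)]))
          else st)
        (S, d)).2).getD x []
      = d.getD x [] ++
        (match l.find? (fun pr => pr.2 == x) with
         | some (i, _) => if x ∈ S then [] else [(PySem.List.pyGetD p (i - 1) "", x)]
         | none => []) := by
  induction l generalizing S d with
  | nil => simp
  | cons pr t ih =>
    obtain ⟨i, a⟩ := pr
    simp only [List.foldl_cons]
    by_cases haq : a ∈ q0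
    case neg =>
      rw [if_neg (by simp [haq])]
      rw [ih S d]
      have hax : a ≠ x := fun h => haq (h ▸ hx)
      rw [List.find?_cons_of_neg (by simpa using hax)]
    by_cases hm : a ∈ S
    · rw [if_neg (by simp [hm])]
      rw [ih S d]
      by_cases hax : a = x
      · subst hax
        rw [List.find?_cons_of_pos (by simp)]
        simp only [if_pos hm]
        cases ht : t.find? (fun pr => pr.2 == a) with
        | none => simp
        | some q => obtain ⟨j, b⟩ := q; simp
      · rw [List.find?_cons_of_neg (by simpa using hax)]
    · rw [if_pos (by simp [haq, hm])]
      rw [ih]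
      by_cases hax : a = x
      · subst hax
        rw [List.find?_cons_of_pos (by simp)]
        have hmem : a ∈ PySem.Set.add S a := (PySem.Set.mem_add S a a).mpr (Or.inr rfl)
        have hgd : (d.modify a [] (· ++ [(PySem.List.pyGetD p (i - 1) "", a)])).getD a []
            = d.getD a [] ++ [(PySem.List.pyGetD p (i - 1) "", a)] :=
          PySem.Dict.getD_modify_self d a [] _
        cases ht : t.find? (fun pr => pr.2 == a) with
        | none => simp [hgd, hm]
        | some q => obtain ⟨j, b⟩ := q; simp [hgd, hm]
      · have hgd : (d.modify a [] (· ++ [(PySem.List.pyGetD p (i - 1) "", a)])).getD x []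
            = d.getD x [] := PySem.Dict.getD_modify_of_ne d _ _ (Ne.symm hax)
        have hma : (x ∈ PySem.Set.add S a) ↔ x ∈ S := by
          rw [PySem.Set.mem_add S a x]
          exact ⟨fun h => h.elim id (fun h' => absurd h'.symm hax), Or.inl⟩
        rw [List.find?_cons_of_neg (by simpa using hax), hgd]
        cases ht : t.find? (fun pr => pr.2 == x) with
        | none => rfl
        | some q => obtain ⟨j, b⟩ := q; simp [hma]

-- the dict built by B holds exactly pvCands
theorem pvBuildPreds_getD (Pcut : List (List (List String))) (x : String)
    (q0 : PySem.Set String) (hx : x ∈ q0) :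
    (pvBuildPreds Pcut q0).getD x [] = pvCands Pcut x := by
  rw [pvBuildPreds, pvCands, ← List.foldl_flatten]
  have H : ∀ (ps : List (List String)) (d : PySem.Dict String (List (String × String))),
      (ps.foldl (fun preds p =>
        ((PySem.List.enumerate p 0).foldl
          (fun (st : PySem.Set String × PySem.Dict String (List (String × String))) pr =>
            if PySem.Set.contains q0 pr.2 && !(PySem.Set.contains st.1 pr.2) then
              (PySem.Set.add st.1 pr.2,
               st.2.modify pr.2 [] (· ++ [(PySem.List.pyGetD p (pr.1 - 1) "", pr.2)]))
            else st)
          (PySem.Set.empty, preds)).2) d).getD x []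
      = d.getD x [] ++ ps.filterMap (fun p => pvCandOf p x) := by
    intro ps
    induction ps with
    | nil => simp
    | cons p t ih =>
      intro d
      simp only [List.foldl_cons, List.filterMap_cons]
      rw [ih, pvPath_step p x q0 hx (PySem.List.enumerate p 0) PySem.Set.empty d,
        pvFind_enumerate p x 0]
      cases hk : PySem.List.index? p x with
      | none =>
        rw [PySem.List.index?_eq_idxOf?] at hk
        simp [pvCandOf, hk]
      | some k =>
        rw [PySem.List.index?_eq_idxOf?] at hk
        simp [pvCandOf, hk, PySem.Set.empty, List.append_assoc]
  rw [H]
  simp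

-- B's output fold tracks A's fold when the set mirrors the list
theorem pvInner_mirror (cl : List (String × String))
    (out : List (String × String)) (s : PySem.Set (String × String))
    (h : ∀ c, c ∈ s ↔ c ∈ out) :
    (cl.foldl (fun (st : List (String × String) × PySem.Set (String × String)) cand =>
        if PySem.Set.contains st.2 cand then st
        else (st.1 ++ [cand], PySem.Set.add st.2 cand)) (out, s)).1
      = cl.foldl pvIns out
    ∧ ∀ c, c ∈ (cl.foldl (fun (st : List (String × String) × PySem.Set (String × String)) cand =>
        if PySem.Set.contains st.2 cand then st
        else (st.1 ++ [cand], PySem.Set.add st.2 cand)) (out, s)).2 ↔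
        c ∈ cl.foldl pvIns out := by
  induction cl generalizing out s with
  | nil => exact ⟨rfl, h⟩
  | cons cand t ih =>
    simp only [List.foldl_cons]
    by_cases hc : cand ∈ out
    · have hs : PySem.Set.contains s cand = true := by simpa using ((h cand).mpr hc)
      rw [if_pos (by simpa using hs), pvIns, if_pos (by simpa using hc)]
      exact ih out s h
    · rw [if_neg (by simpa using (fun hm => hc ((h cand).mp hm))), pvIns,
        if_neg (by simpa using hc)]
      refine ih (out ++ [cand]) (PySem.Set.add s cand) ?_
      intro c
      rw [PySem.Set.mem_add s cand c, List.mem_append, List.mem_singleton, h c]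

-- the main loop: A's fold equals the first component of B's fold
theorem pvMain (Pcut : List (List (List String))) (newC : List (String × String))
    (preds : PySem.Dict String (List (String × String)))
    (hp : ∀ e ∈ newC, (e.2 == "q0_aug_nodes") = true →
      preds.getD e.1 [] = pvCands Pcut e.1)
    (out : List (String × String)) (s : PySem.Set (String × String))
    (h : ∀ c, c ∈ s ↔ c ∈ out) :
    newC.foldl (fun newC_adj e =>
      if e.2 == "q0_aug_nodes" then
        Pcut.foldl (fun newC_adj paths =>
          paths.foldl (fun newC_adj p =>
            if p.contains e.1 then
              match PySem.List.index? p e.1 with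
              | some e0_idx =>
                if newC_adj.contains (PySem.List.pyGetD p ((e0_idx : Int) - 1) "", e.1) then newC_adj
                else newC_adj ++ [(PySem.List.pyGetD p ((e0_idx : Int) - 1) "", e.1)]
              | none => newC_adj
            else newC_adj) newC_adj) newC_adj
      else newC_adj ++ [e]) out
    = (newC.foldl (fun (st : List (String × String) × PySem.Set (String × String)) e =>
        if e.2 == "q0_aug_nodes" then
          (preds.getD e.1 []).foldl (fun st cand =>
            if PySem.Set.contains st.2 cand then st
            else (st.1 ++ [cand], PySem.Set.add st.2 cand)) st
        else (st.1 ++ [e], PySem.Set.add st.2 e)) (out, s)).1 := by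
  induction newC generalizing out s with
  | nil => rfl
  | cons e t ih =>
    simp only [List.foldl_cons]
    by_cases hq : (e.2 == "q0_aug_nodes") = true
    · rw [if_pos hq, if_pos hq, pvA_inner Pcut e.1 out,
        hp e (List.mem_cons_self) hq]
      obtain ⟨h1, h2⟩ := pvInner_mirror (pvCands Pcut e.1) out s h
      rw [← h1] at *
      exact ih (fun e' he' => hp e' (List.mem_cons_of_mem e he')) _ _ (by
        intro c
        rw [h2 c, h1])
    · rw [if_neg hq, if_neg hq]
      refine ih (fun e' he' => hp e' (List.mem_cons_of_mem e he'))
        (out ++ [e]) (PySem.Set.add s e) ?_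
      intro c
      rw [PySem.Set.mem_add s e c, List.mem_append, List.mem_singleton, h c]

-- ===== VERDICT (by name: the statement is the Claim_ definition above) =====
theorem update_Q0_edges_spec : Claim_equal_update_Q0_edges := by
  intro Pcut newC _
  unfold Spec_update_Q0_edges update_Q0_edges update_Q0_edges_alt
  refine pvMain Pcut newC _ ?_ [] PySem.Set.empty (by simp [PySem.Set.empty])
  intro e he hq
  have hx : e.1 ∈ pvQ0Nodes newC := by
    rw [pvQ0Nodes, PySem.Set.mem_ofList]
    exact List.mem_filterMap.mpr ⟨e, he, by rw [if_pos hq]⟩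
  have hne : (pvQ0Nodes newC).isEmpty = false :=
    List.isEmpty_eq_false_iff_exists_mem.mpr ⟨e.1, hx⟩
  rw [hne]
  simp only [Bool.false_eq_true, if_false]
  exact pvBuildPreds_getD Pcut e.1 (pvQ0Nodes newC) hx
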